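-- pv_equiv track=rewrite | github.com/JaesungYoun/coding | Jaesung/Programmers/후보키.py | solution
-- ===== SOURCE A (Python) =====
-- from itertools import combinations
--
-- def solution(relation):
--     answer = 0
--     row = len(relation)
--     col = len(relation[0])
--
--
--     candi = set()
--
--
--     for i in range(1,col+1):
--         combi = list(combinations(range(col),i))
--
--         for j in combi:
--             keys = set()
--
--             for r in relation:
--                 temp = []
--                 for k in j:
--                     temp.append(r[k])
--                 keys.add(tuple(temp))
--
--             if len(keys) == row: # 유일성 만족하면
--                 for ca in candi: # 최소성 만족하면
--                     if not (set(ca) - set(j)):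
--                         break
--                 else:
--
--                     candi.add(j)
--
--     return len(candi)
-- ===== SOURCE B (Python) =====
-- def solution(relation):
--     row = len(relation)
--     col = len(relation[0])
--     subsets = [[]]
--     for c in range(col):
--         subsets = subsets + [s + [c] for s in subsets]
--     superkeys = [s for s in subsets
--                  if s and len({tuple(r[k] for k in s) for r in relation}) == row]
--     return sum(1 for m in superkeys
--                if not any(set(s) < set(m) for s in superkeys))
-- ===== Notes on version B (the rewrite author's own statement) =====
-- stated objective: alternative
-- what changed: A enumerates column subsets by increasing size via itertools.combinations and prunes non-minimal keys on the fly against the growing candidate set; B first builds the full powerset by iterated extension, collects ALL unique-projection subsets (superkeys) in one filtering pass, and then counts those with no proper subset among the superkeys.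
-- outside the precondition, e.g. on solution([]): A raises IndexError, B raises IndexError; on solution([['a', 'b'], ['c']]): A raises IndexError, B raises IndexError
import Mathlib
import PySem

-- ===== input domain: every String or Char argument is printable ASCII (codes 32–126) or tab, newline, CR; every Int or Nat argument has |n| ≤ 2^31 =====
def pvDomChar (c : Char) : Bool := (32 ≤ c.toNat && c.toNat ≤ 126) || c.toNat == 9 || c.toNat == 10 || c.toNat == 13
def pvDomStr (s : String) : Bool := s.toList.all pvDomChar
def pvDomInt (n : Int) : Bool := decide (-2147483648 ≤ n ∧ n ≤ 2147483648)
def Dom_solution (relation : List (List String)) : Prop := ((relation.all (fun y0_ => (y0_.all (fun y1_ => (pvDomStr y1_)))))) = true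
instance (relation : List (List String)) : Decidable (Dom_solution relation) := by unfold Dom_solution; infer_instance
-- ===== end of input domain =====

-- B restructures A's search: A enumerates subsets by size and prunes non-minimal keys
-- against the growing candidate set; B builds the whole powerset, filters the superkeys
-- in one pass, and counts those with no proper subset among the superkeys (objective: alternative).

-- ===== PORT A =====
-- itertools.combinations(l, i) in itertools' lexicographic order
def pyCombinations {α : Type} : List α → Nat → List (List α)
  | _, 0 => [[]]
  | [], _ + 1 => []
  | x :: xs, i + 1 => (pyCombinations xs i).map (x :: ·) ++ pyCombinations xs (i + 1)

-- r[k]; the .getD [] / .getD "" fallbacks are only reached where Python raises IndexError,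
-- which Pre_solution excludes
def solution (relation : List (List String)) : Int :=
  let row := relation.length
  let col := ((PySem.List.pyGet? relation 0).getD []).length
  let candi : PySem.Set (List Nat) :=
    (PySem.List.pyRange 1 ((col : Int) + 1) 1).foldl (fun candi i =>
      let combi := pyCombinations (List.range col) i.toNat
      combi.foldl (fun candi j =>
        let keys : PySem.Set (List String) :=
          relation.foldl (fun keys r =>
            PySem.Set.add keys
              (j.foldl (fun (temp : List String) (k : Nat) => temp ++ [(PySem.List.pyGet? r (k : Int)).getD ""]) [])) PySem.Set.empty
        if keys.length = row then
          -- for ca in candi: if not (set(ca) - set(j)): break / else: candi.add(j)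
          if candi.any (fun ca => (PySem.Set.diff (PySem.Set.ofList ca) (PySem.Set.ofList j)).isEmpty) then
            candi
          else
            PySem.Set.add candi j
        else candi) candi) PySem.Set.empty
  (candi.length : Int)

-- ===== PORT B =====
def solution_alt (relation : List (List String)) : Int :=
  let row := relation.length
  let col := ((PySem.List.pyGet? relation 0).getD []).length
  let subsets : List (List Nat) :=
    (List.range col).foldl (fun subsets c => subsets ++ subsets.map (· ++ [c])) [[]]
  let superkeys := subsets.filter (fun s =>
    !s.isEmpty &&
      (PySem.Set.ofList (relation.map (fun r => s.map (fun (k : Nat) => (PySem.List.pyGet? r (k : Int)).getD "")))).length = row)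
  ((superkeys.countP (fun m => !superkeys.any (fun s =>
      PySem.Set.issubset (PySem.Set.ofList s) (PySem.Set.ofList m) &&
        !PySem.Set.equal (PySem.Set.ofList s) (PySem.Set.ofList m)))) : Int)

-- ===== PRECONDITION & SPEC =====
-- Pre_ excludes exactly the inputs where Python raises IndexError (both A and B do):
-- the empty relation (relation[0]) and rows shorter than the first row (r[k]).
def Pre_solution (relation : List (List String)) : Prop :=
  relation ≠ [] ∧ ∀ r ∈ relation, (relation.headD []).length ≤ r.length
instance (relation : List (List String)) : Decidable (Pre_solution relation) := by
  unfold Pre_solution; infer_instance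

def pvWitness_solution : List (List String) := [["a", "1"], ["b", "1"]]

def Spec_solution (relation : List (List String)) (out : Int) : Prop := out = solution_alt relation
instance (relation : List (List String)) (out : Int) : Decidable (Spec_solution relation out) := by
  unfold Spec_solution; infer_instance

-- ===== CLAIM (what is proved, stated in full; the proofs are below) =====
def Claim_equal_solution : Prop := ∀ (relation : List (List String)), Dom_solution relation → Pre_solution relation → Spec_solution relation (solution relation)

-- ===== LEMMAS AND PROOFS =====

-- semantic layer: projection, superkey test, minimality, and the two enumerations
def pvCol (rel : List (List String)) : Nat := ((PySem.List.pyGet? rel 0).getD []).length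

def pvRowProj (r : List String) (j : List Nat) : List String :=
  j.map (fun (k : Nat) => (PySem.List.pyGet? r (k : Int)).getD "")

def pvSK (rel : List (List String)) (j : List Nat) : Bool :=
  (PySem.Set.ofList (rel.map (fun r => pvRowProj r j))).length == rel.length

def pvMin (rel : List (List String)) (j : List Nat) : Bool :=
  !j.isEmpty && pvSK rel j &&
    j.sublists.all (fun t => t.isEmpty || t == j || !pvSK rel t)

def pvSubB (ca j : List Nat) : Bool :=
  (PySem.Set.diff (PySem.Set.ofList ca) (PySem.Set.ofList j)).isEmpty

def pvStepA (rel : List (List String)) (candi : List (List Nat)) (j : List Nat) : List (List Nat) :=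
  if pvSK rel j then
    if candi.any (fun ca => pvSubB ca j) then candi else PySem.Set.add candi j
  else candi

def pvEnumUpto (col i : Nat) : List (List Nat) :=
  (List.range i).flatMap (fun k => pyCombinations (List.range col) (k + 1))

def pvEnumB (col : Nat) : List (List Nat) :=
  (List.range col).foldl (fun subsets c => subsets ++ subsets.map (· ++ [c])) [[]]

-- combinatorial basics
theorem mem_pyCombinations {α : Type} (l : List α) (n : Nat) (j : List α) :
    j ∈ pyCombinations l n ↔ j.Sublist l ∧ j.length = n := by
  induction l generalizing n j with
  | nil =>
    cases n with
    | zero => simp [pyCombinations, List.sublist_nil]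
    | succ n =>
      simp only [pyCombinations, List.not_mem_nil, false_iff]
      rintro ⟨h, hl⟩
      simp [List.sublist_nil] at h
      subst h; simp at hl
  | cons x xs ih =>
    cases n with
    | zero =>
      simp [pyCombinations, List.length_eq_zero_iff]
      intro h; subst h; exact List.nil_sublist _
    | succ n =>
      simp [pyCombinations, ih]
      constructor
      · rintro (⟨t, ⟨hs, hl⟩, rfl⟩ | ⟨hs, hl⟩)
        · exact ⟨List.cons_sublist_cons.mpr hs |>.trans (List.Sublist.refl _), by simp [hl]⟩
        · exact ⟨hs.trans (List.sublist_cons_self x xs), hl⟩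
      · rintro ⟨hs, hl⟩
        rcases List.sublist_cons_iff.mp hs with h | ⟨r, rfl, hr⟩
        · exact Or.inr ⟨h, hl⟩
        · exact Or.inl ⟨r, ⟨hr, by simpa using hl⟩, rfl⟩

theorem nodup_pyCombinations {α : Type} [DecidableEq α] {l : List α} (h : l.Nodup) (n : Nat) :
    (pyCombinations l n).Nodup := by
  induction l generalizing n with
  | nil => cases n <;> simp [pyCombinations]
  | cons x xs ih =>
    cases n with
    | zero => simp [pyCombinations]
    | succ n =>
      have hx : x ∉ xs := (List.nodup_cons.mp h).1
      have hxs : xs.Nodup := (List.nodup_cons.mp h).2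
      refine List.Nodup.append ((ih hxs n).map ?_ ) (ih hxs (n + 1)) ?_
      · intro a b hab; simpa using hab
      · intro j hj1 hj2
        rcases List.mem_map.mp hj1 with ⟨t, _, rfl⟩
        have := (mem_pyCombinations xs (n + 1) (x :: t)).mp hj2
        exact hx (this.1.subset (by simp))

theorem sorted_subset_sublist {t m : List Nat} (ht : t.Pairwise (· < ·)) (hm : m.Pairwise (· < ·))
    (h : ∀ x ∈ t, x ∈ m) : t.Sublist m := by
  induction m generalizing t with
  | nil => cases t with
    | nil => exact List.Sublist.refl _
    | cons a t' => exact absurd (h a (by simp)) (by simp)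
  | cons b m' ihm =>
    cases t with
    | nil => exact List.nil_sublist _
    | cons a t' =>
      have hbm' : ∀ y ∈ m', b < y := fun y hy => (List.pairwise_cons.mp hm).1 y hy
      have hat' : ∀ y ∈ t', a < y := fun y hy => (List.pairwise_cons.mp ht).1 y hy
      by_cases hab : a = b
      · subst hab
        refine List.cons_sublist_cons.mpr
          (ihm (List.pairwise_cons.mp ht).2 (List.pairwise_cons.mp hm).2 ?_)
        intro x hx
        have hax : a < x := hat' x hx
        rcases List.mem_cons.mp (h x (List.mem_cons_of_mem a hx)) with h' | h'
        · omega
        · exact h'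
      · have hba : b < a := by
          have := h a (List.mem_cons_self)
          rcases List.mem_cons.mp this with h' | h'
          · exact absurd h' hab
          · exact hbm' a h'
        have hsub : (a :: t').Sublist m' := by
          refine ihm ht (List.pairwise_cons.mp hm).2 ?_
          intro x hx
          have hbx : b < x := by
            rcases List.mem_cons.mp hx with rfl | h'
            · exact hba
            · have := hat' x h'; omega
          rcases List.mem_cons.mp (h x hx) with h' | h'
          · omega
          · exact h'
        exact hsub.cons b

-- PySem.Set bridges
theorem pvSubB_iff (ca j : List Nat) : pvSubB ca j = true ↔ ∀ x ∈ ca, x ∈ j := by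
  simp [pvSubB, PySem.Set.diff, PySem.Set.contains, List.isEmpty_iff, List.filter_eq_nil_iff,
    PySem.Set.mem_ofList]

theorem pvIssubset_iff (s m : List Nat) :
    PySem.Set.issubset (PySem.Set.ofList s) (PySem.Set.ofList m) = true ↔ ∀ x ∈ s, x ∈ m := by
  simp [PySem.Set.issubset, PySem.Set.contains, PySem.Set.mem_ofList]

theorem pvEqual_iff (s m : List Nat) :
    PySem.Set.equal (PySem.Set.ofList s) (PySem.Set.ofList m) = true ↔
      ((∀ x ∈ s, x ∈ m) ∧ ∀ x ∈ m, x ∈ s) := by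
  simp [PySem.Set.equal, PySem.Set.issubset, PySem.Set.contains, PySem.Set.mem_ofList]

theorem pvAdd_of_not_mem {α : Type} [BEq α] [LawfulBEq α] (s : PySem.Set α) (x : α) (h : x ∉ s) :
    PySem.Set.add s x = s ++ [x] := by
  simp [PySem.Set.add, PySem.Set.contains, h]

theorem pvMin_iff (rel : List (List String)) (j : List Nat) :
    pvMin rel j = true ↔
      (j ≠ [] ∧ pvSK rel j = true ∧ ∀ t, t.Sublist j → t ≠ [] → t ≠ j → pvSK rel t = false) := by
  simp only [pvMin, Bool.and_eq_true, Bool.not_eq_true', List.all_eq_true, List.mem_sublists,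
    Bool.or_eq_true, List.isEmpty_iff, beq_iff_eq]
  rw [List.isEmpty_eq_false_iff]
  constructor
  · rintro ⟨⟨h1, h2⟩, h3⟩
    exact ⟨h1, h2, fun t ht htne htj => by rcases h3 t ht with (h | h) | h <;> tauto⟩
  · rintro ⟨h1, h2, h3⟩
    refine ⟨⟨h1, h2⟩, fun t ht => ?_⟩
    by_cases he : t = []
    · tauto
    by_cases hj2 : t = j
    · tauto
    · exact Or.inr (h3 t ht he hj2)

-- every nonempty superkey contains a nonempty minimal key
theorem pvExists_min (rel : List (List String)) (col : Nat) :
    ∀ (n : Nat) (t : List Nat), t.length ≤ n → t.Sublist (List.range col) → t ≠ [] →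
      pvSK rel t = true → ∃ m, m.Sublist t ∧ m ≠ [] ∧ pvMin rel m = true := by
  intro n
  induction n with
  | zero =>
    intro t hlen _ hne _
    cases t with
    | nil => exact absurd rfl hne
    | cons a t' => simp at hlen
  | succ n ih =>
    intro t hlen hsub hne hsk
    by_cases hmin : pvMin rel t = true
    · exact ⟨t, List.Sublist.refl t, hne, hmin⟩
    · have hx : ∃ u, u.Sublist t ∧ u ≠ [] ∧ u ≠ t ∧ pvSK rel u = true := by
        by_contra hcon
        push Not at hcon
        exact hmin ((pvMin_iff rel t).mpr ⟨hne, hsk, fun u hu hune hut => by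
          cases hpv : pvSK rel u
          · rfl
          · exact absurd hpv (hcon u hu hune hut)⟩)
      rcases hx with ⟨u, hut, hune, hneq, husk⟩
      have hlt : u.length < t.length :=
        Nat.lt_of_le_of_ne hut.length_le (fun he => hneq (hut.eq_of_length he))
      rcases ih u (by omega) (hut.trans hsub) hune husk with ⟨m, hm1, hm2, hm3⟩
      exact ⟨m, hm1.trans hut, hm2, hm3⟩

-- one step of A's pruning loop, against a complete processed prefix, is a minimality filter
theorem pvStepA_filter (rel : List (List String)) (col i : Nat) (j : List Nat)
    (pre : List (List Nat)) (hj : j.Sublist (List.range col)) (hlen : j.length = i + 1)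
    (hpre : ∀ t ∈ pre, t.Sublist (List.range col))
    (hcomp : ∀ m, m.Sublist (List.range col) → m ≠ [] → m.length ≤ i → m ∈ pre)
    (hnotin : j ∉ pre) :
    pvStepA rel (pre.filter (pvMin rel)) j = (pre ++ [j]).filter (pvMin rel) := by
  have hjne : j ≠ [] := by intro h; subst h; simp at hlen
  have hjp : j.Pairwise (· < ·) := List.pairwise_lt_range.sublist hj
  have hfil : (pre ++ [j]).filter (pvMin rel) =
      pre.filter (pvMin rel) ++ if pvMin rel j then [j] else [] := by
    simp [List.filter_append, List.filter_singleton]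
  cases hsk : pvSK rel j
  · have hminf : pvMin rel j = false := by simp [pvMin, hsk]
    simp [pvStepA, hsk, hfil, hminf]
  · cases hmin : pvMin rel j
    · -- j is a superkey but not minimal: some earlier candidate is contained in it
      have hbad : ∃ t, t.Sublist j ∧ t ≠ [] ∧ t ≠ j ∧ pvSK rel t = true := by
        by_contra hcon
        push Not at hcon
        refine absurd ((pvMin_iff rel j).mpr ⟨hjne, hsk, fun t ht h1 h2 => ?_⟩) (by simp [hmin])
        cases hpv : pvSK rel t
        · rfl
        · exact absurd hpv (hcon t ht h1 h2)
      rcases hbad with ⟨t, htj, htne, htj2, htsk⟩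
      rcases pvExists_min rel col t.length t le_rfl (htj.trans hj) htne htsk with ⟨m, hm1, hm2, hm3⟩
      have hmlen : m.length ≤ i := by
        have h1 : m.length ≤ t.length := hm1.length_le
        have h2 : t.length < j.length :=
          Nat.lt_of_le_of_ne htj.length_le (fun he => htj2 (htj.eq_of_length he))
        omega
      have hmpre : m ∈ pre := hcomp m ((hm1.trans htj).trans hj) hm2 hmlen
      have hany : (pre.filter (pvMin rel)).any (fun ca => pvSubB ca j) = true := by
        refine List.any_eq_true.mpr ⟨m, List.mem_filter.mpr ⟨hmpre, hm3⟩, ?_⟩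
        exact (pvSubB_iff m j).mpr (fun x hx => (hm1.trans htj).subset hx)
      simp [pvStepA, hsk, hany, hfil, hmin]
    · -- j is minimal: nothing in candi is contained in it, so it is added
      have hany : (pre.filter (pvMin rel)).any (fun ca => pvSubB ca j) = false := by
        rw [List.any_eq_false]
        intro ca hca hsubb
        obtain ⟨hcapre, hcamin⟩ := List.mem_filter.mp hca
        obtain ⟨hcane, hcask, _⟩ := (pvMin_iff rel ca).mp hcamin
        have hcap : ca.Pairwise (· < ·) := List.pairwise_lt_range.sublist (hpre ca hcapre)
        have hcasub : ca.Sublist j := sorted_subset_sublist hcap hjp ((pvSubB_iff _ _).mp hsubb)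
        have hcanej : ca ≠ j := fun he => hnotin (he ▸ hcapre)
        have := ((pvMin_iff rel j).mp hmin).2.2 ca hcasub hcane hcanej
        rw [this] at hcask
        exact Bool.false_ne_true hcask
      have hnotin' : j ∉ pre.filter (pvMin rel) := fun h => hnotin (List.mem_filter.mp h).1
      simp [pvStepA, hsk, hany, hfil, hmin, pvAdd_of_not_mem _ _ hnotin']

theorem pvInnerFold (rel : List (List String)) (col i : Nat) :
    ∀ (R pre : List (List Nat)),
      (∀ j ∈ R, j.Sublist (List.range col) ∧ j.length = i + 1) →
      (∀ t ∈ pre, t.Sublist (List.range col)) →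
      (∀ m, m.Sublist (List.range col) → m ≠ [] → m.length ≤ i → m ∈ pre) →
      (pre ++ R).Nodup →
      R.foldl (pvStepA rel) (pre.filter (pvMin rel)) = (pre ++ R).filter (pvMin rel) := by
  intro R
  induction R with
  | nil => intro pre _ _ _ _; simp
  | cons j R' ih =>
    intro pre hR hpre hcomp hnd
    have hj := hR j (by simp)
    have hnotin : j ∉ pre := by
      intro hmem
      have hd := (List.nodup_append.mp hnd).2.2
      exact hd j hmem j (by simp) rfl
    simp only [List.foldl_cons]
    rw [pvStepA_filter rel col i j pre hj.1 hj.2 hpre hcomp hnotin]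
    have hassoc : (pre ++ [j]) ++ R' = pre ++ j :: R' := by simp
    have hnd' : ((pre ++ [j]) ++ R').Nodup := by rw [hassoc]; exact hnd
    have := ih (pre ++ [j]) (fun x hx => hR x (by simp [hx]))
      (by intro t ht; rcases List.mem_append.mp ht with h | h
          · exact hpre t h
          · simp at h; subst h; exact hj.1)
      (fun m h1 h2 h3 => List.mem_append.mpr (Or.inl (hcomp m h1 h2 h3))) hnd'
    rw [this, hassoc]

theorem mem_pvEnumUpto (col i : Nat) (m : List Nat) :
    m ∈ pvEnumUpto col i ↔ m.Sublist (List.range col) ∧ m ≠ [] ∧ m.length ≤ i := by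
  simp only [pvEnumUpto, List.mem_flatMap, List.mem_range, mem_pyCombinations]
  constructor
  · rintro ⟨k, hk, hs, hl⟩
    refine ⟨hs, ?_, by omega⟩
    intro h; subst h; simp at hl
  · rintro ⟨hs, hne, hle⟩
    have hpos : 0 < m.length := List.length_pos_iff.mpr hne
    exact ⟨m.length - 1, by omega, hs, by omega⟩

theorem pvEnumUpto_succ (col i : Nat) :
    pvEnumUpto col (i + 1) = pvEnumUpto col i ++ pyCombinations (List.range col) (i + 1) := by
  simp [pvEnumUpto, List.range_succ, List.flatMap_append]

theorem nodup_pvEnumUpto (col i : Nat) : (pvEnumUpto col i).Nodup := by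
  induction i with
  | zero => simp [pvEnumUpto]
  | succ i ih =>
    rw [pvEnumUpto_succ]
    refine List.Nodup.append ih (nodup_pyCombinations List.nodup_range (i + 1)) ?_
    intro x hx1 hx2
    have h1 := (mem_pvEnumUpto col i x).mp hx1
    have h2 := (mem_pyCombinations _ _ x).mp hx2
    omega

-- A's whole loop computes the minimality filter of its enumeration
theorem pvACore (rel : List (List String)) (col : Nat) (i : Nat) :
    (List.range i).foldl
        (fun c k => (pyCombinations (List.range col) (k + 1)).foldl (pvStepA rel) c) [] =
      (pvEnumUpto col i).filter (pvMin rel) := by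
  induction i with
  | zero => simp [pvEnumUpto]
  | succ i ih =>
    rw [List.range_succ, List.foldl_append, ih]
    simp only [List.foldl_cons, List.foldl_nil]
    rw [pvInnerFold rel col i (pyCombinations (List.range col) (i + 1)) (pvEnumUpto col i)
      (fun j hj => by
        have := (mem_pyCombinations _ _ j).mp hj
        exact ⟨this.1, this.2⟩)
      (fun t ht => ((mem_pvEnumUpto col i t).mp ht).1)
      (fun m h1 h2 h3 => (mem_pvEnumUpto col i m).mpr ⟨h1, h2, h3⟩)
      (by rw [← pvEnumUpto_succ]; exact nodup_pvEnumUpto col (i + 1))]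
    rw [← pvEnumUpto_succ]

theorem pvKeysFold (rel : List (List String)) (j : List Nat) :
    rel.foldl (fun keys r =>
        PySem.Set.add keys
          (j.foldl (fun (temp : List String) (k : Nat) =>
            temp ++ [(PySem.List.pyGet? r (k : Int)).getD ""]) []))
        PySem.Set.empty
      = PySem.Set.ofList (rel.map (fun r => pvRowProj r j)) := by
  have h1 : ∀ r : List String,
      j.foldl (fun (temp : List String) (k : Nat) =>
        temp ++ [(PySem.List.pyGet? r (k : Int)).getD ""]) [] = pvRowProj r j := by
    intro r
    rw [PySem.List.foldl_append_singleton_eq_map]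
    simp [pvRowProj]
  rw [PySem.Set.ofList_eq_foldl, List.foldl_map]
  simp only [h1]
  rfl

theorem pvSolutionA (rel : List (List String)) :
    solution rel = (((pvEnumUpto (pvCol rel) (pvCol rel)).filter (pvMin rel)).length : Int) := by
  simp only [solution]
  rw [← pvACore rel (pvCol rel) (pvCol rel)]
  have hcol : ((PySem.List.pyGet? rel 0).getD []).length = pvCol rel := rfl
  rw [hcol]
  congr 1
  rw [PySem.List.pyRange_one, List.foldl_map]
  have hrange : (((pvCol rel : Int) + 1) - 1).toNat = pvCol rel := by omega
  rw [hrange]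
  congr 1
  refine PySem.List.foldl_congr_mem _ _ _ _ ?_
  intro c k _
  have htn : ((1 : Int) + (k : Int)).toNat = k + 1 := by omega
  rw [htn]
  refine PySem.List.foldl_congr_mem _ _ _ _ ?_
  intro candi j _
  rw [pvKeysFold rel j]
  unfold pvStepA pvSubB pvSK
  by_cases h : (PySem.Set.ofList (rel.map (fun r => pvRowProj r j))).length = rel.length
  · simp [h]
  · simp [h]

-- B's enumeration
theorem pvEnumB_succ (c : Nat) :
    pvEnumB (c + 1) = pvEnumB c ++ (pvEnumB c).map (· ++ [c]) := by
  simp [pvEnumB, List.range_succ]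

theorem mem_pvEnumB (col : Nat) (s : List Nat) : s ∈ pvEnumB col ↔ s.Sublist (List.range col) := by
  induction col generalizing s with
  | zero =>
    simp [pvEnumB, List.sublist_nil]
  | succ c ih =>
    rw [pvEnumB_succ, List.range_succ]
    simp only [List.mem_append, List.mem_map, ih]
    constructor
    · rintro (h | ⟨t, ht, rfl⟩)
      · exact h.trans (List.sublist_append_left _ _)
      · exact List.Sublist.append ht (List.Sublist.refl [c])
    · intro h
      rcases List.sublist_append_iff.mp h with ⟨s1, s2, rfl, h1, h2⟩
      rcases List.sublist_singleton.mp h2 with rfl | rfl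
      · exact Or.inl (by simpa using h1)
      · exact Or.inr ⟨s1, h1, rfl⟩

theorem nodup_pvEnumB (col : Nat) : (pvEnumB col).Nodup := by
  induction col with
  | zero => simp [pvEnumB]
  | succ c ih =>
    rw [pvEnumB_succ]
    refine List.Nodup.append ih (ih.map fun a b h => by simpa using h) ?_
    intro x hx1 hx2
    rcases List.mem_map.mp hx2 with ⟨t, _, rfl⟩
    have hc : c ∈ List.range c := ((mem_pvEnumB c _).mp hx1).subset (by simp)
    simp at hc

theorem pvBCount (rel : List (List String)) (col : Nat) :
    ((pvEnumB col).filter (fun s => !s.isEmpty && pvSK rel s)).countP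
        (fun m => !((pvEnumB col).filter (fun s => !s.isEmpty && pvSK rel s)).any
          (fun s => PySem.Set.issubset (PySem.Set.ofList s) (PySem.Set.ofList m) &&
            !PySem.Set.equal (PySem.Set.ofList s) (PySem.Set.ofList m)))
      = (pvEnumB col).countP (pvMin rel) := by
  rw [List.countP_filter]
  refine List.countP_congr ?_
  intro m hm
  have hmsub : m.Sublist (List.range col) := (mem_pvEnumB col m).mp hm
  have hmp : m.Pairwise (· < ·) := List.pairwise_lt_range.sublist hmsub
  by_cases hq1 : m = []
  · subst hq1
    simp [pvMin]
  cases hsk : pvSK rel m with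
  | false =>
    simp only [Bool.and_false, Bool.false_eq_true, false_iff]
    intro hmin
    exact absurd (((pvMin_iff rel m).mp hmin).2.1) (by simp [hsk])
  | true =>
    have h1 : m.isEmpty = false := by simp [hq1]
    rw [h1]
    simp only [Bool.not_false, Bool.and_true]
    rw [Bool.not_eq_true', List.any_eq_false]
    have hE : (∃ t, t.Sublist m ∧ t ≠ [] ∧ t ≠ m ∧ pvSK rel t = true) ↔
        ¬ (∀ s ∈ (pvEnumB col).filter (fun s => !s.isEmpty && pvSK rel s),
            ¬(PySem.Set.issubset (PySem.Set.ofList s) (PySem.Set.ofList m) &&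
              !PySem.Set.equal (PySem.Set.ofList s) (PySem.Set.ofList m)) = true) := by
      constructor
      · rintro ⟨t, ht1, ht2, ht3, ht4⟩ hall
        have htmem : t ∈ (pvEnumB col).filter (fun s => !s.isEmpty && pvSK rel s) := by
          refine List.mem_filter.mpr ⟨(mem_pvEnumB col t).mpr (ht1.trans hmsub), ?_⟩
          simp [ht2, ht4]
        refine hall t htmem ?_
        have hsub : PySem.Set.issubset (PySem.Set.ofList t) (PySem.Set.ofList m) = true :=
          (pvIssubset_iff t m).mpr (fun x hx => ht1.subset hx)
        have heq : PySem.Set.equal (PySem.Set.ofList t) (PySem.Set.ofList m) = false := by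
          cases he : PySem.Set.equal (PySem.Set.ofList t) (PySem.Set.ofList m) with
          | false => rfl
          | true =>
            obtain ⟨h1, h2⟩ := (pvEqual_iff t m).mp he
            have htp : t.Pairwise (· < ·) := List.pairwise_lt_range.sublist (ht1.trans hmsub)
            have : m.Sublist t := sorted_subset_sublist hmp htp h2
            exact absurd (ht1.antisymm this) ht3
        simp [hsub, heq]
      · intro hnall
        rcases not_forall.mp hnall with ⟨t, ht⟩
        rcases not_forall.mp ht with ⟨htmem, hbad⟩
        obtain ⟨htenum, htpred⟩ := List.mem_filter.mp htmem
        have ht2 : t ≠ [] := by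
          rcases Bool.and_eq_true_iff.mp htpred with ⟨h1, _⟩
          simpa [List.isEmpty_iff] using h1
        have ht4 : pvSK rel t = true := (Bool.and_eq_true_iff.mp htpred).2
        have hpair : (PySem.Set.issubset (PySem.Set.ofList t) (PySem.Set.ofList m) &&
            !PySem.Set.equal (PySem.Set.ofList t) (PySem.Set.ofList m)) = true := by
          cases hb : (PySem.Set.issubset (PySem.Set.ofList t) (PySem.Set.ofList m) &&
              !PySem.Set.equal (PySem.Set.ofList t) (PySem.Set.ofList m)) with
          | true => rfl
          | false => exact absurd (by simp [hb]) hbad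
        obtain ⟨hss, hne⟩ := Bool.and_eq_true_iff.mp hpair
        have htp : t.Pairwise (· < ·) :=
          List.pairwise_lt_range.sublist ((mem_pvEnumB col t).mp htenum)
        have ht1 : t.Sublist m := sorted_subset_sublist htp hmp ((pvIssubset_iff t m).mp hss)
        have ht3 : t ≠ m := by
          intro he
          subst he
          rw [Bool.not_eq_true'] at hne
          exact absurd ((pvEqual_iff t t).mpr ⟨fun x hx => hx, fun x hx => hx⟩)
            (by simp [hne])
        exact ⟨t, ht1, ht2, ht3, ht4⟩
    constructor
    · intro hall
      refine (pvMin_iff rel m).mpr ⟨hq1, hsk, fun t ht1 ht2 ht3 => ?_⟩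
      cases hpv : pvSK rel t with
      | false => rfl
      | true => exact absurd (fun s hs => by simpa using hall s hs) (hE.mp ⟨t, ht1, ht2, ht3, hpv⟩)
    · intro hmin s hs
      obtain ⟨_, _, h3⟩ := (pvMin_iff rel m).mp hmin
      by_contra hbad
      refine hE.mpr ?_ |>.elim fun t ht => ?_
      · intro hall
        exact hall s hs (by simpa using hbad)
      · obtain ⟨ht1, ht2, ht3, ht4⟩ := ht
        rw [h3 t ht1 ht2 ht3] at ht4
        exact Bool.false_ne_true ht4

theorem pvSolutionB (rel : List (List String)) :
    solution_alt rel = ((pvEnumB (pvCol rel)).countP (pvMin rel) : Int) := by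
  simp only [solution_alt]
  have hcol : ((PySem.List.pyGet? rel 0).getD []).length = pvCol rel := rfl
  rw [hcol]
  congr 1
  have hsubsets : (List.range (pvCol rel)).foldl
      (fun subsets c => subsets ++ subsets.map (· ++ [c])) [[]] = pvEnumB (pvCol rel) := rfl
  rw [hsubsets]
  have pvDecideBeq : ∀ a b : Nat, decide (a = b) = (a == b) := by
    intro a b
    by_cases h : a = b <;> simp [h]
  have hpred : (fun s : List Nat => !s.isEmpty &&
      decide ((PySem.Set.ofList (rel.map (fun r =>
        s.map (fun (k : Nat) => (PySem.List.pyGet? r (k : Int)).getD "")))).length = rel.length))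
      = fun s => !s.isEmpty && pvSK rel s := by
    funext t
    unfold pvSK pvRowProj
    rw [pvDecideBeq]
  rw [hpred]
  exact pvBCount rel (pvCol rel)

theorem pvMain (rel : List (List String)) : solution rel = solution_alt rel := by
  rw [pvSolutionA, pvSolutionB rel]
  congr 1
  rw [List.countP_eq_length_filter]
  apply List.Perm.length_eq
  refine (List.perm_ext_iff_of_nodup
    ((nodup_pvEnumUpto _ _).filter _) ((nodup_pvEnumB _).filter _)).mpr ?_
  intro a
  simp only [List.mem_filter, mem_pvEnumUpto, mem_pvEnumB]
  constructor
  · rintro ⟨⟨h2, _, _⟩, h1⟩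
    exact ⟨h2, h1⟩
  · rintro ⟨h2, h1⟩
    refine ⟨⟨h2, ((pvMin_iff rel a).mp h1).1, ?_⟩, h1⟩
    have := h2.length_le
    simpa using this

-- ===== VERDICT (by name: the statement is the Claim_ definition above) =====
theorem solution_spec : Claim_equal_solution := by
  intro relation _ _
  unfold Spec_solution
  exact pvMain relation
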